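-- pv_equiv track=rewrite | github.com/AIgen-Solutions-s-r-l/abbanoa-water-analysis | src/infrastructure/normalization/selargius_normalizer.py | _determine_node_type
-- ===== SOURCE A (Python) =====
-- from typing import Dict, List, Optional, Tuple
--
-- def _determine_node_type(metrics: List[Dict]) -> str:
--     """Determine node type based on available metrics."""
--     metric_names = [m["metric_name"].lower() for m in metrics]
--
--     if any("input" in name or "ingresso" in name for name in metric_names):
--         return "input"
--     elif any("output" in name or "uscita" in name for name in metric_names):
--         return "output"
--     elif any("tank" in name or "serbatoio" in name for name in metric_names):
--         return "storage"
--     else: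
--         return "distribution"
-- ===== SOURCE B (Python) =====
-- def _determine_node_type(metrics):
--     """Determine node type based on available metrics."""
--     has_input = has_output = has_storage = False
--     for m in metrics:
--         name = m["metric_name"].lower()
--         has_input = has_input or "input" in name or "ingresso" in name
--         has_output = has_output or "output" in name or "uscita" in name
--         has_storage = has_storage or "tank" in name or "serbatoio" in name
--     if has_input:
--         return "input"
--     if has_output:
--         return "output"
--     if has_storage:
--         return "storage"
--     return "distribution"
-- ===== Notes on version B (the rewrite author's own statement) =====
-- stated objective: alternative
-- what changed: Replaces A's list-comprehension plus three separate any() scans over the lowered-name list with a single pass over the metrics that lowercases each name once and accumulates three boolean presence flags, followed by a priority decision input > output > storage > distribution.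
import Mathlib
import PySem

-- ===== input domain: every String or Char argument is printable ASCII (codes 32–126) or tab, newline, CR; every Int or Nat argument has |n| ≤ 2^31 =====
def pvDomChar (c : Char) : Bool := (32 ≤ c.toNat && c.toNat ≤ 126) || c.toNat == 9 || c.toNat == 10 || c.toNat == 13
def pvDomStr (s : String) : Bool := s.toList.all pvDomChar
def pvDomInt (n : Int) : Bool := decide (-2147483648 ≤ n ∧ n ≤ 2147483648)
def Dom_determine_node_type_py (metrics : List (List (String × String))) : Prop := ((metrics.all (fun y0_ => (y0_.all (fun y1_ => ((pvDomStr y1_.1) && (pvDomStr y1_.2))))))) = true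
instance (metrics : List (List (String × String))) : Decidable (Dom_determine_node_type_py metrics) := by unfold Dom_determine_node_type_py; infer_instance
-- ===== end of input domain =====

-- B replaces A's three separate any() scans over a pre-built lowered-name list with one
-- pass that lowercases each name once and accumulates three boolean flags, then decides
-- by priority (alternative decomposition, same cost).


-- ===== PORT A =====
-- m["metric_name"]: first value under that key; total form (getD "") is used only under
-- Pre_, which guarantees the key is present (Python raises KeyError otherwise).
def pvLookupMN (m : List (String × String)) : String :=
  (((m.find? (fun p => p.1 == "metric_name")).map Prod.snd).getD "")

def determine_node_type_py (metrics : List (List (String × String))) : String :=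
  let metric_names := metrics.map (fun m => PySem.Str.lower (pvLookupMN m))
  if metric_names.any (fun name => PySem.Str.isIn "input" name || PySem.Str.isIn "ingresso" name) then "input"
  else if metric_names.any (fun name => PySem.Str.isIn "output" name || PySem.Str.isIn "uscita" name) then "output"
  else if metric_names.any (fun name => PySem.Str.isIn "tank" name || PySem.Str.isIn "serbatoio" name) then "storage"
  else "distribution"

-- ===== PORT B =====
def determine_node_type_py_alt (metrics : List (List (String × String))) : String :=
  let flags := metrics.foldl (fun (fl : Bool × Bool × Bool) m =>
      let name := PySem.Str.lower (pvLookupMN m)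
      (fl.1 || PySem.Str.isIn "input" name || PySem.Str.isIn "ingresso" name,
       fl.2.1 || PySem.Str.isIn "output" name || PySem.Str.isIn "uscita" name,
       fl.2.2 || PySem.Str.isIn "tank" name || PySem.Str.isIn "serbatoio" name))
    (false, false, false)
  if flags.1 then "input"
  else if flags.2.1 then "output"
  else if flags.2.2 then "storage"
  else "distribution"

-- ===== PRECONDITION & SPEC =====
-- Pre_ excludes exactly the inputs where some metric dict lacks the key "metric_name",
-- on which the Python A (and B) raises KeyError.
def Pre_determine_node_type_py (metrics : List (List (String × String))) : Prop :=
  (metrics.all (fun m => m.any (fun p => p.1 == "metric_name"))) = true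
instance (metrics : List (List (String × String))) : Decidable (Pre_determine_node_type_py metrics) := by unfold Pre_determine_node_type_py; infer_instance

def pvWitness_determine_node_type_py : (List (List (String × String))) :=
  [[("metric_name", "Tank Level")], [("metric_name", "flow"), ("unit", "L/s")]]

def Spec_determine_node_type_py (metrics : List (List (String × String))) (out : String) : Prop := out = determine_node_type_py_alt metrics
instance (metrics : List (List (String × String))) (out : String) : Decidable (Spec_determine_node_type_py metrics out) := by unfold Spec_determine_node_type_py; infer_instance

-- ===== CLAIM (what is proved, stated in full; the proofs are below) =====
def Claim_equal_determine_node_type_py : Prop := ∀ (metrics : List (List (String × String))), Dom_determine_node_type_py metrics → Pre_determine_node_type_py metrics → Spec_determine_node_type_py metrics (determine_node_type_py metrics)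

-- ===== LEMMAS AND PROOFS =====
-- B's fold computes the disjunction of the three per-name tests, starting from any flags.
theorem pv_fold_flags (metrics : List (List (String × String))) (a b c : Bool) :
    metrics.foldl (fun (fl : Bool × Bool × Bool) m =>
      let name := PySem.Str.lower (pvLookupMN m)
      (fl.1 || PySem.Str.isIn "input" name || PySem.Str.isIn "ingresso" name,
       fl.2.1 || PySem.Str.isIn "output" name || PySem.Str.isIn "uscita" name,
       fl.2.2 || PySem.Str.isIn "tank" name || PySem.Str.isIn "serbatoio" name)) (a, b, c)
    = (a || metrics.any (fun m => PySem.Str.isIn "input" (PySem.Str.lower (pvLookupMN m)) || PySem.Str.isIn "ingresso" (PySem.Str.lower (pvLookupMN m))),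
       b || metrics.any (fun m => PySem.Str.isIn "output" (PySem.Str.lower (pvLookupMN m)) || PySem.Str.isIn "uscita" (PySem.Str.lower (pvLookupMN m))),
       c || metrics.any (fun m => PySem.Str.isIn "tank" (PySem.Str.lower (pvLookupMN m)) || PySem.Str.isIn "serbatoio" (PySem.Str.lower (pvLookupMN m)))) := by
  induction metrics generalizing a b c with
  | nil => simp
  | cons m rest ih =>
      simp only [List.foldl_cons, List.any_cons, ih]
      refine Prod.ext ?_ (Prod.ext ?_ ?_) <;> simp only [Bool.or_assoc]

-- ===== VERDICT (by name: the statement is the Claim_ definition above) =====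
theorem determine_node_type_py_spec : Claim_equal_determine_node_type_py := by
  intro metrics _ _
  unfold Spec_determine_node_type_py determine_node_type_py determine_node_type_py_alt
  rw [pv_fold_flags]
  simp only [List.any_map, Function.comp_def, Bool.false_or]
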